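-- pv_equiv track=rewrite | github.com/redhat-cop/agnosticd | ansible/action_plugins/agnosticd_odcr.py | reservation_match
-- ===== SOURCE A (Python) =====
-- def reservation_match(r1, r2):
--     """Return true if 2 reservations match.
--
--     Reservations match when all the reservations keys except instance_count
--     are identical"""
--
--     # same ref
--     if r1 == r2:
--         return True
--
--     compared = set(r1.keys()).union(set(r2.keys())).difference(set(['instance_count']))
--
--     for c in compared:
--         if c in r1 and c not in r2:
--             return False
--
--         if c not in r1 and c in r2:
--             return False
--
--         if c not in r1 and c not in r2:
--             continue
--
--         if c in r1 and c in r2: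
--             if r1[c] == r2[c]:
--                 continue
--
--             return False
--
--     return True
-- ===== SOURCE B (Python) =====
-- def reservation_match(r1, r2):
--     """Return true if 2 reservations match, ignoring instance_count.
--
--     Sort each reservation's items (minus instance_count) by key and
--     compare the two sorted item lists."""
--     def stripped(r):
--         return sorted(((k, v) for k, v in r.items() if k != 'instance_count'),
--                       key=lambda kv: kv[0])
--     return stripped(r1) == stripped(r2)
-- ===== Notes on version B (the rewrite author's own statement) =====
-- stated objective: simpler
-- what changed: Replaces the union-of-key-sets construction and the four-way per-key membership loop (plus the r1==r2 shortcut) with a single canonicalisation: sort each dict's items minus instance_count by key and compare the two sorted lists.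
import Mathlib
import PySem

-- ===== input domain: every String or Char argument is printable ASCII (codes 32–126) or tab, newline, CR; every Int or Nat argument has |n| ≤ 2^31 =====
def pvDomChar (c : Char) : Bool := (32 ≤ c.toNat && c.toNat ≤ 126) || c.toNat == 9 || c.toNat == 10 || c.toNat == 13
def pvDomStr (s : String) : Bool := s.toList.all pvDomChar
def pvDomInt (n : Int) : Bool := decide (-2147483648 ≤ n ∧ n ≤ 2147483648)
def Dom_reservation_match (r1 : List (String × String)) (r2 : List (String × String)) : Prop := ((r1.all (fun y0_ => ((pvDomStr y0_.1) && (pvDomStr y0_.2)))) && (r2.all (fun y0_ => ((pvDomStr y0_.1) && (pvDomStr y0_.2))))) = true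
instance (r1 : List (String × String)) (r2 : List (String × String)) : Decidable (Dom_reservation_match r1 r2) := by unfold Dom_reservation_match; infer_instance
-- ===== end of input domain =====

-- B replaces A's union-of-key-sets construction and four-way per-key membership loop
-- (plus the r1 == r2 shortcut) by canonicalising each dict — items minus instance_count,
-- sorted by key — and comparing the two lists (objective: simpler).

-- ===== PORT A =====
-- exact port of Python's 'r1 == r2' on dicts: mapping equality, insertion-order-insensitive
def pyDictEq (d1 d2 : PySem.Dict String String) : Bool :=
  d1.size == d2.size && d1.items.all (fun p => d2.get? p.1 == some p.2)

-- A's per-key loop with its early returns, over the list of compared keys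
-- (the loop runs over a Python set; its result is iteration-order-independent)
def checkKeys (d1 d2 : PySem.Dict String String) : List String → Bool
  | [] => true
  | c :: rest =>
    if d1.contains c && !(d2.contains c) then false
    else if !(d1.contains c) && d2.contains c then false
    else if !(d1.contains c) && !(d2.contains c) then checkKeys d1 d2 rest
    else if d1.get? c == d2.get? c then checkKeys d1 d2 rest
    else false

def reservation_match (r1 : List (String × String)) (r2 : List (String × String)) : Bool :=
  let d1 := PySem.Dict.ofList r1
  let d2 := PySem.Dict.ofList r2
  if pyDictEq d1 d2 then true
  else
    let compared := PySem.Set.diff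
      (PySem.Set.union (PySem.Set.ofList d1.keys) (PySem.Set.ofList d2.keys))
      (PySem.Set.ofList ["instance_count"])
    checkKeys d1 d2 compared

-- ===== PORT B =====
-- the generator '(k, v) for k, v in r.items() if k != "instance_count"'
def stripped (r : List (String × String)) : List (String × String) :=
  (PySem.Dict.ofList r).items.filter (fun kv => kv.1 != "instance_count")

-- 'sorted(..., key=lambda kv: kv[0])'
def strippedSorted (r : List (String × String)) : List (String × String) :=
  PySem.List.sorted (stripped r) (fun kv => kv.1) false

def reservation_match_alt (r1 : List (String × String)) (r2 : List (String × String)) : Bool :=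
  strippedSorted r1 == strippedSorted r2

-- ===== PRECONDITION & SPEC =====
def Spec_reservation_match (r1 : List (String × String)) (r2 : List (String × String)) (out : Bool) : Prop := out = reservation_match_alt r1 r2
instance (r1 : List (String × String)) (r2 : List (String × String)) (out : Bool) : Decidable (Spec_reservation_match r1 r2 out) := by unfold Spec_reservation_match; infer_instance

-- ===== CLAIM (what is proved, stated in full; the proofs are below) =====
def Claim_equal_reservation_match : Prop := ∀ (r1 : List (String × String)) (r2 : List (String × String)), Dom_reservation_match r1 r2 → Spec_reservation_match r1 r2 (reservation_match r1 r2)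

-- ===== LEMMAS AND PROOFS =====

-- the common proposition both programs decide: lookups agree on every key except instance_count
def AgreeExceptIC (d1 d2 : PySem.Dict String String) : Prop :=
  ∀ c : String, c ≠ "instance_count" → d1.get? c = d2.get? c

theorem checkKeys_iff (d1 d2 : PySem.Dict String String) (cs : List String) :
    checkKeys d1 d2 cs = true ↔ ∀ c ∈ cs, d1.get? c = d2.get? c := by
  induction cs with
  | nil => simp [checkKeys]
  | cons c rest ih =>
    simp only [checkKeys, List.mem_cons]
    rw [PySem.Dict.contains_eq_isSome_get? (d := d1) (k := c),
        PySem.Dict.contains_eq_isSome_get? (d := d2) (k := c)]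
    cases hg1 : d1.get? c <;> cases hg2 : d2.get? c <;> simp [ih, hg1, hg2]

theorem pyDictEq_agree (d1 d2 : PySem.Dict String String)
    (h1 : d1.keys.Nodup) (h : pyDictEq d1 d2 = true) :
    ∀ c, d1.get? c = d2.get? c := by
  rw [pyDictEq, Bool.and_eq_true, beq_iff_eq, List.all_eq_true] at h
  obtain ⟨hsz, hall'⟩ := h
  have hall : ∀ p ∈ d1.items, d2.get? p.1 = some p.2 := by
    intro p hp; have := hall' p hp; simpa using this
  have hsub : d1.keys ⊆ d2.keys := by
    intro k hk
    simp only [PySem.Dict.keys, List.mem_map] at hk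
    obtain ⟨p, hp, rfl⟩ := hk
    exact PySem.Dict.mem_keys_of_mem_items d2 (PySem.Dict.mem_items_of_get?_eq_some d2 (hall p hp))
  have hlen : d2.keys.length ≤ d1.keys.length := by
    have : d1.keys.length = d2.keys.length := by
      simpa [PySem.Dict.keys, PySem.Dict.size] using hsz
    omega
  have hperm : d1.keys.Perm d2.keys :=
    (List.subperm_of_subset h1 hsub).perm_of_length_le hlen
  intro c
  cases hg1 : d1.get? c with
  | some v =>
    exact (hall (c, v) (PySem.Dict.mem_items_of_get?_eq_some d1 hg1)).symm
  | none =>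
    cases hg2 : d2.get? c with
    | none => rfl
    | some w =>
      have hc2 : c ∈ d2.keys := PySem.Dict.mem_keys_of_mem_items d2 (PySem.Dict.mem_items_of_get?_eq_some d2 hg2)
      rw [PySem.Dict.get?_eq_none_iff_not_mem_keys] at hg1
      exact absurd (hperm.mem_iff.mpr hc2) hg1

theorem reservation_match_iff (r1 r2 : List (String × String)) :
    reservation_match r1 r2 = true ↔
      AgreeExceptIC (PySem.Dict.ofList r1) (PySem.Dict.ofList r2) := by
  have hnd1 := PySem.Dict.nodup_keys_ofList (κ := String) (ν := String) r1
  by_cases hpq : pyDictEq (PySem.Dict.ofList r1) (PySem.Dict.ofList r2) = true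
  · simp only [reservation_match]
    rw [if_pos hpq]
    simp only [true_iff]
    intro c _
    exact pyDictEq_agree _ _ hnd1 hpq c
  · simp only [reservation_match]
    rw [if_neg hpq, checkKeys_iff]
    set d1 := PySem.Dict.ofList r1
    set d2 := PySem.Dict.ofList r2
    constructor
    · intro h c hc
      by_cases hmem : c ∈ d1.keys ∨ c ∈ d2.keys
      · refine h c ?_
        rw [PySem.Set.mem_diff, PySem.Set.mem_union, PySem.Set.mem_ofList, PySem.Set.mem_ofList, PySem.Set.mem_ofList]
        exact ⟨hmem, by simpa using hc⟩
      · push Not at hmem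
        rw [(PySem.Dict.get?_eq_none_iff_not_mem_keys d1 c).mpr hmem.1,
            (PySem.Dict.get?_eq_none_iff_not_mem_keys d2 c).mpr hmem.2]
    · intro h c hcmem
      rw [PySem.Set.mem_diff, PySem.Set.mem_union] at hcmem
      refine h c ?_
      have := hcmem.2
      simpa [PySem.Set.mem_ofList] using this

theorem stripped_keys_nodup (r : List (String × String)) :
    ((stripped r).map (·.1)).Nodup := by
  have hk : ((PySem.Dict.ofList r).items.map (·.1)).Nodup := by
    have := PySem.Dict.nodup_keys_ofList (κ := String) (ν := String) r
    simpa [PySem.Dict.keys] using this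
  have hs : (stripped r).Sublist (PySem.Dict.ofList r).items := List.filter_sublist
  exact (hs.map (fun p => p.1)).nodup hk

theorem sorted_eq_iff_perm (r1 r2 : List (String × String)) :
    strippedSorted r1 = strippedSorted r2 ↔ (stripped r1).Perm (stripped r2) := by
  constructor
  · intro h
    unfold strippedSorted at h
    exact ((PySem.List.sorted_perm (stripped r1) (fun kv => kv.1) false).symm.trans
      (h ▸ PySem.List.sorted_perm (stripped r2) (fun kv => kv.1) false))
  · intro hp
    have hperm : (strippedSorted r1).Perm (stripped r2) :=
      (PySem.List.sorted_perm _ _ _).trans hp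
    have hle : (strippedSorted r1).Pairwise (fun a b => a.1 ≤ b.1) :=
      PySem.List.sorted_pairwise (stripped r1) (fun kv => kv.1)
    have hnd : ((strippedSorted r1).map (·.1)).Nodup := by
      have := (PySem.List.sorted_perm (stripped r1) (fun kv => kv.1) false).map (·.1)
      exact (this.nodup_iff).mpr (stripped_keys_nodup r1)
    have hne : (strippedSorted r1).Pairwise (fun a b => a.1 ≠ b.1) := by
      rw [List.Nodup, List.pairwise_map] at hnd
      exact hnd
    have hlt : (strippedSorted r1).Pairwise (fun a b => a.1 < b.1) := by
      refine (hle.and hne).imp ?_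
      rintro a b ⟨h1, h2⟩
      exact lt_of_le_of_ne h1 h2
    exact (PySem.List.sorted_eq_of_perm_of_pairwise_lt _ _ _ hperm hlt).symm

theorem mem_stripped (r : List (String × String)) (k v : String) :
    (k, v) ∈ stripped r ↔
      (PySem.Dict.ofList r).get? k = some v ∧ k ≠ "instance_count" := by
  rw [stripped, List.mem_filter,
    ← PySem.Dict.get?_eq_some_iff_mem_items _ _ _ (PySem.Dict.nodup_keys_ofList r)]
  simp

theorem perm_iff_agree (r1 r2 : List (String × String)) :
    (stripped r1).Perm (stripped r2) ↔
      AgreeExceptIC (PySem.Dict.ofList r1) (PySem.Dict.ofList r2) := by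
  have hnd1 : (stripped r1).Nodup := (stripped_keys_nodup r1).of_map
  have hnd2 : (stripped r2).Nodup := (stripped_keys_nodup r2).of_map
  rw [List.perm_ext_iff_of_nodup hnd1 hnd2]
  constructor
  · intro h c hc
    cases hg1 : (PySem.Dict.ofList r1).get? c with
    | some v =>
      have : (c, v) ∈ stripped r2 := (h (c, v)).mp ((mem_stripped r1 c v).mpr ⟨hg1, hc⟩)
      exact ((mem_stripped r2 c v).mp this).1.symm
    | none =>
      cases hg2 : (PySem.Dict.ofList r2).get? c with
      | none => rfl
      | some w =>
        have : (c, w) ∈ stripped r1 := (h (c, w)).mpr ((mem_stripped r2 c w).mpr ⟨hg2, hc⟩)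
        rw [((mem_stripped r1 c w).mp this).1] at hg1
        exact absurd hg1 (by simp)
  · rintro h ⟨k, v⟩
    rw [mem_stripped, mem_stripped]
    constructor
    · rintro ⟨hg, hk⟩; exact ⟨(h k hk) ▸ hg, hk⟩
    · rintro ⟨hg, hk⟩; exact ⟨(h k hk).symm ▸ hg, hk⟩

theorem alt_iff (r1 r2 : List (String × String)) :
    reservation_match_alt r1 r2 = true ↔
      AgreeExceptIC (PySem.Dict.ofList r1) (PySem.Dict.ofList r2) := by
  rw [reservation_match_alt, beq_iff_eq, sorted_eq_iff_perm, perm_iff_agree]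

-- ===== VERDICT (by name: the statement is the Claim_ definition above) =====
theorem reservation_match_spec : Claim_equal_reservation_match := by
  intro r1 r2 _
  unfold Spec_reservation_match
  rw [Bool.eq_iff_iff, reservation_match_iff, alt_iff]
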